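-- pv_equiv track=rewrite | github.com/luk036/csdigit | src/csdigit/csd.py | to_decimal_integral
-- ===== SOURCE A (Python) =====
-- from typing import Tuple
--
-- ERROR1 = "Work with 0, +, -, and . only"
--
-- def to_decimal_integral(csd: str) -> Tuple[int, int]:
--     """Handle integral part of CSD string."""
--     decimal_value: int = 0
--     for pos, digit in enumerate(csd):
--         if digit == "0":
--             decimal_value <<= 1  # Bit shift left (equivalent to *2)
--         elif digit == "+":
--             decimal_value = (decimal_value << 1) + 1  # Shift left and add 1
--         elif digit == "-":
--             decimal_value = (decimal_value << 1) - 1  # Shift left and subtract 1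
--         elif digit == ".":
--             return decimal_value, pos + 1  # Return value and decimal position
--         else:
--             raise ValueError(ERROR1)
--     return decimal_value, 0  # Return value and 0 if no decimal point found
-- ===== SOURCE B (Python) =====
-- ERROR1 = "Work with 0, +, -, and . only"
--
-- def to_decimal_integral(csd: str):
--     """Handle integral part of CSD string."""
--     idx = csd.find(".")
--     if idx >= 0:
--         prefix, position = csd[:idx], idx + 1
--     else:
--         prefix, position = csd, 0
--     value = 0
--     weight = 1
--     for digit in reversed(prefix):
--         if digit == "0":
--             d = 0
--         elif digit == "+":
--             d = 1
--         elif digit == "-":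
--             d = -1
--         else:
--             raise ValueError(ERROR1)
--         value += d * weight
--         weight *= 2
--     return value, position
-- ===== Notes on version B (the rewrite author's own statement) =====
-- stated objective: alternative
-- what changed: B first locates the '.' terminator with str.find to get the position and prefix, then evaluates the prefix as an explicit weighted sum over the reversed string with a running power-of-two weight, instead of A's single left-to-right Horner shift-and-add loop that also scans for '.' inline.
import Mathlib
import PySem

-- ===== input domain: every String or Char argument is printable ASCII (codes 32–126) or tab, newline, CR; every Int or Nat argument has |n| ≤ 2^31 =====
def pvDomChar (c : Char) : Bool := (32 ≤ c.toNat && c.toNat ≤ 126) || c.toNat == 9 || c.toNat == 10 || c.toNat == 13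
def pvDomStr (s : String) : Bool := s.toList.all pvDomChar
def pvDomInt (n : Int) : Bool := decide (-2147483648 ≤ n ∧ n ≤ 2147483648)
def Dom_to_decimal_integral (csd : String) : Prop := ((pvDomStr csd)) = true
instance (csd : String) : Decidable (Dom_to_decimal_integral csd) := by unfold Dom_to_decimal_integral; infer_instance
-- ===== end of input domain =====

-- B locates the '.' terminator with str.find first, then evaluates the prefix as a weighted
-- sum over the reversed string with a running power-of-two weight, instead of A's single
-- Horner shift-and-add loop that also scans for '.' inline (objective: alternative).

-- ===== PORT A =====
-- A's for-loop over enumerate(csd): state = (decimal_value, pos); 'x << 1' = 'x * 2'.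
def pvLoopA : List Char → Int → Int → Int × Int
  | [], acc, _ => (acc, 0)
  | c :: rest, acc, pos =>
    if c = '0' then pvLoopA rest (acc * 2) (pos + 1)
    else if c = '+' then pvLoopA rest (acc * 2 + 1) (pos + 1)
    else if c = '-' then pvLoopA rest (acc * 2 - 1) (pos + 1)
    else if c = '.' then (acc, pos + 1)
    else (0, 0)  -- Python: raise ValueError(ERROR1); excluded by Pre_

def to_decimal_integral (csd : String) : Int × Int := pvLoopA csd.toList 0 0

-- ===== PORT B =====
def pvDigit? (c : Char) : Option Int :=
  if c = '0' then some 0 else if c = '+' then some 1 else if c = '-' then some (-1) else none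

-- B's for-loop over reversed(prefix): state = (value, weight).
def pvLoopB : List Char → Int → Int → Int
  | [], v, _ => v
  | c :: rest, v, w =>
    match pvDigit? c with
    | some d => pvLoopB rest (v + d * w) (w * 2)
    | none => 0  -- Python: raise ValueError(ERROR1); excluded by Pre_

def to_decimal_integral_alt (csd : String) : Int × Int :=
  let idx := PySem.Chars.find csd.toList ['.']  -- idx = csd.find(".")
  if 0 ≤ idx then
    (pvLoopB (csd.toList.take idx.toNat).reverse 0 1, idx + 1)  -- prefix = csd[:idx]
  else
    (pvLoopB csd.toList.reverse 0 1, 0)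

-- ===== PRECONDITION & SPEC =====
-- Pre_ excludes exactly the inputs on which A raises ValueError (a character other than
-- '0', '+', '-' before the first '.'); B raises ValueError on exactly those inputs too.
def Pre_to_decimal_integral (csd : String) : Prop :=
  ((csd.toList.takeWhile (fun c => c != '.')).all
    (fun c => c == '0' || c == '+' || c == '-')) = true
instance (csd : String) : Decidable (Pre_to_decimal_integral csd) := by
  unfold Pre_to_decimal_integral; infer_instance

def pvWitness_to_decimal_integral : String := "+0-.++"

def Spec_to_decimal_integral (csd : String) (out : Int × Int) : Prop := out = to_decimal_integral_alt csd
instance (csd : String) (out : Int × Int) : Decidable (Spec_to_decimal_integral csd out) := by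
  unfold Spec_to_decimal_integral; infer_instance

-- ===== CLAIM (what is proved, stated in full; the proofs are below) =====
def Claim_equal_to_decimal_integral : Prop := ∀ (csd : String), Dom_to_decimal_integral csd → Pre_to_decimal_integral csd → Spec_to_decimal_integral csd (to_decimal_integral csd)

-- ===== LEMMAS AND PROOFS =====

def pvValid (c : Char) : Prop := c = '0' ∨ c = '+' ∨ c = '-'

def pvDv (c : Char) : Int := if c = '0' then 0 else if c = '+' then 1 else -1

def pvH (l : List Char) (acc : Int) : Int := l.foldl (fun a c => a * 2 + pvDv c) acc

def pvRev : List Char → Int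
  | [] => 0
  | c :: m => pvDv c + 2 * pvRev m

theorem pvLoopA_append (l r : List Char) (acc pos : Int)
    (h : ∀ c ∈ l, pvValid c) :
    pvLoopA (l ++ r) acc pos = pvLoopA r (pvH l acc) (pos + l.length) := by
  induction l generalizing acc pos with
  | nil => simp [pvH]
  | cons c l ih =>
    have htl : ∀ c ∈ l, pvValid c := fun c hm => h c (by simp [hm])
    have key : ∀ a : Int, pvLoopA (l ++ r) a (pos + 1) = pvLoopA r (pvH l a) (pos + (l.length + 1)) := by
      intro a
      rw [ih _ _ htl]
      congr 1
      omega
    rcases h c (by simp) with h0 | h0 | h0 <;> subst h0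
    · rw [List.cons_append,
        show pvLoopA ('0' :: (l ++ r)) acc pos = pvLoopA (l ++ r) (acc * 2) (pos + 1)
          from by simp [pvLoopA], key,
        show pvH ('0' :: l) acc = pvH l (acc * 2) from by simp [pvH, pvDv]]
      simp
    · rw [List.cons_append,
        show pvLoopA ('+' :: (l ++ r)) acc pos = pvLoopA (l ++ r) (acc * 2 + 1) (pos + 1)
          from by simp [pvLoopA], key,
        show pvH ('+' :: l) acc = pvH l (acc * 2 + 1) from by simp [pvH, pvDv]]
      simp
    · rw [List.cons_append,
        show pvLoopA ('-' :: (l ++ r)) acc pos = pvLoopA (l ++ r) (acc * 2 - 1) (pos + 1)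
          from by simp [pvLoopA], key,
        show pvH ('-' :: l) acc = pvH l (acc * 2 - 1) from by simp [pvH, pvDv, sub_eq_add_neg]]
      simp

theorem pvLoopB_eq (m : List Char) (v w : Int) (h : ∀ c ∈ m, pvValid c) :
    pvLoopB m v w = v + w * pvRev m := by
  induction m generalizing v w with
  | nil => simp [pvLoopB, pvRev]
  | cons c m ih =>
    have hm : ∀ c ∈ m, pvValid c := fun c h' => h c (by simp [h'])
    rcases h c (by simp) with h0 | h0 | h0 <;> subst h0 <;>
      simp [pvLoopB, pvDigit?, pvRev, pvDv, ih _ _ hm] <;> ring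

theorem pvRev_append (l : List Char) (c : Char) :
    pvRev (l ++ [c]) = pvRev l + 2 ^ l.length * pvDv c := by
  induction l with
  | nil => simp [pvRev]
  | cons a l ih => simp [pvRev, ih, pow_succ]; ring

theorem pvH_eq_pvRev_reverse (l : List Char) (acc : Int) :
    pvH l acc = acc * 2 ^ l.length + pvRev l.reverse := by
  induction l generalizing acc with
  | nil => simp [pvH, pvRev]
  | cons c l ih =>
    rw [show pvH (c :: l) acc = pvH l (acc * 2 + pvDv c) from by simp [pvH], ih]
    simp [pvRev_append, pow_succ]
    ring

-- B's value on a valid prefix equals A's Horner value.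
theorem pvLoopB_reverse (p : List Char) (h : ∀ c ∈ p, pvValid c) :
    pvLoopB p.reverse 0 1 = pvH p 0 := by
  have h' : ∀ c ∈ p.reverse, pvValid c := fun c hc => h c (List.mem_reverse.mp hc)
  rw [pvLoopB_eq _ _ _ h', pvH_eq_pvRev_reverse]
  ring

theorem pv_dropWhile_head (q : Char → Bool) (l : List Char) (c : Char) (t : List Char)
    (h : l.dropWhile q = c :: t) : q c = false := by
  induction l with
  | nil => simp [List.dropWhile] at h
  | cons a l ih =>
    by_cases ha : q a
    · rw [List.dropWhile_cons, if_pos ha] at h; exact ih h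
    · rw [List.dropWhile_cons, if_neg ha] at h
      rcases h with ⟨rfl, rfl⟩
      simpa using ha

-- inside the '.'-free block, no position starts with '.'
theorem pv_no_dot_prefix (p t0 : List Char) (hpne : ∀ c ∈ p, c ≠ '.')
    (j : Nat) (hj : j < p.length) : ¬ ['.'] <+: (p ++ t0).drop j := by
  intro hpref
  rw [List.drop_append_of_le_length (le_of_lt hj)] at hpref
  rcases hd : p.drop j with _ | ⟨c, rest⟩
  · have := List.length_drop (l := p) (i := j)
    rw [hd] at this; simp at this; omega
  · rw [hd, List.cons_append] at hpref
    obtain ⟨u, hu⟩ := hpref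
    have hc : c = '.' := by
      have := congrArg (List.head? ·) hu
      simpa using this.symm
    have : c ∈ p := (List.drop_subset j p) (hd ▸ List.mem_cons_self ..)
    exact hpne c this hc

theorem pv_find_split (p t : List Char) (hpne : ∀ c ∈ p, c ≠ '.') :
    PySem.Chars.find (p ++ '.' :: t) ['.'] = p.length := by
  have hinf : ['.'] <:+: (p ++ '.' :: t) := ⟨p, t, by simp⟩
  have hge : 0 ≤ PySem.Chars.find (p ++ '.' :: t) ['.'] :=
    (PySem.Chars.find_nonneg_iff _ _).mpr hinf
  obtain ⟨hpref, hmin⟩ := PySem.Chars.find_spec hge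
  have hdropP : (p ++ '.' :: t).drop p.length = '.' :: t := by
    simp
  have htoNat : (PySem.Chars.find (p ++ '.' :: t) ['.']).toNat = p.length := by
    by_contra hne
    rcases Nat.lt_or_ge (PySem.Chars.find (p ++ '.' :: t) ['.']).toNat p.length with hlt | hge2
    · exact pv_no_dot_prefix p ('.' :: t) hpne _ hlt hpref
    · have : p.length < (PySem.Chars.find (p ++ '.' :: t) ['.']).toNat := by omega
      exact hmin p.length this (by rw [hdropP]; exact ⟨t, rfl⟩)
  omega

theorem to_decimal_integral_eq (csd : String)
    (hpre : Pre_to_decimal_integral csd) :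
    to_decimal_integral csd = to_decimal_integral_alt csd := by
  unfold to_decimal_integral to_decimal_integral_alt
  have hsplit : csd.toList.takeWhile (fun c => c != '.') ++
      csd.toList.dropWhile (fun c => c != '.') = csd.toList :=
    List.takeWhile_append_dropWhile
  set p := csd.toList.takeWhile (fun c => c != '.') with hp
  have hpvalid : ∀ c ∈ p, pvValid c := by
    intro c hc
    have := List.all_eq_true.mp hpre c hc
    unfold pvValid
    simp at this
    tauto
  have hpne : ∀ c ∈ p, c ≠ '.' := by
    intro c hc
    have := List.mem_takeWhile_imp hc
    simpa using this
  rcases hrc : csd.toList.dropWhile (fun c => c != '.') with _ | ⟨c0, t⟩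
  · -- no '.' in csd: position 0, whole string is the prefix
    have hcsp : csd.toList = p := by rw [← hsplit, hrc, List.append_nil]
    have hnin : ¬ ['.'] <:+: csd.toList := by
      intro hin
      have : '.' ∈ csd.toList := hin.sublist.subset (by simp)
      exact hpne '.' (hcsp ▸ this) rfl
    have hfind : PySem.Chars.find csd.toList ['.'] = -1 :=
      (PySem.Chars.find_eq_neg_one_iff _ _).mpr hnin
    rw [hfind]
    norm_num
    rw [hcsp, show p = p ++ ([] : List Char) from by simp,
      pvLoopA_append _ _ _ _ hpvalid]
    simp [pvLoopA, pvLoopB_reverse p hpvalid]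
  · -- first '.' is at index p.length
    have hc0 : c0 = '.' := by
      have := pv_dropWhile_head _ _ _ _ hrc
      simpa using this
    subst hc0
    have hcs : csd.toList = p ++ '.' :: t := by rw [← hsplit, hrc]
    rw [hcs, pv_find_split p t hpne]
    rw [if_pos (by positivity)]
    rw [pvLoopA_append _ _ _ _ hpvalid]
    simp [pvLoopA, pvLoopB_reverse p hpvalid]

-- ===== VERDICT (by name: the statement is the Claim_ definition above) =====
theorem to_decimal_integral_spec : Claim_equal_to_decimal_integral := by
  intro csd _ hpre
  unfold Spec_to_decimal_integral
  exact to_decimal_integral_eq csd hpre
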